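-- pv_equiv track=rewrite | github.com/hyunwoo-song/TOT | algorithm/day10/contack.py | F_D
-- ===== SOURCE A (Python) =====
-- def F_D(Distance):
--     M_D = 0
--     M_D_i = 0
--     for i in range(len(Distance)):
--         if M_D <= Distance[i]:
--             M_D = Distance[i]
--             M_D_i = i
--     return M_D_i
-- ===== SOURCE B (Python) =====
-- def F_D(Distance):
--     # pass 1: running maximum seeded with 0 (so an all-negative list keeps M = 0)
--     M = 0
--     for d in Distance:
--         if M < d:
--             M = d
--     # pass 2: last index whose value reaches M (stays 0 when M is never reached)
--     idx = 0
--     for i, d in enumerate(Distance):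
--         if M <= d:
--             idx = i
--     return idx
-- ===== Notes on version B (the rewrite author's own statement) =====
-- stated objective: alternative
-- what changed: A's single loop that threads a (max, index) pair is replaced by two independent linear passes: a plain max fold seeded with 0, then an enumerate scan keeping the last index whose value reaches that max.
import Mathlib
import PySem

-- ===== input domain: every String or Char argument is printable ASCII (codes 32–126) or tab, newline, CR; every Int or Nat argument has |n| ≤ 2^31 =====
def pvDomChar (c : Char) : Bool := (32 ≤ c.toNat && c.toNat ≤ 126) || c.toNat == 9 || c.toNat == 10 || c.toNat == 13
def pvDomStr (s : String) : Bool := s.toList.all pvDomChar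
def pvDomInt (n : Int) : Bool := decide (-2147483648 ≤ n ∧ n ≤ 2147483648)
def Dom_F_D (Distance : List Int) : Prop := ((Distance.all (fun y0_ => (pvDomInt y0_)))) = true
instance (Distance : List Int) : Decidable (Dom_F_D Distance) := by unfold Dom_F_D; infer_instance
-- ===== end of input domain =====

-- B replaces A's single (max, index)-pair loop by two independent passes: a max fold, then a last-index scan.

-- ===== PORT A =====
-- one loop over range(len(Distance)) threading the pair (M_D, M_D_i)
def F_D (Distance : List Int) : Int :=
  (((PySem.List.pyRange 0 (Distance.length : Int) 1).foldl
      (fun (s : Int × Int) (i : Int) =>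
        if s.1 ≤ PySem.List.pyGetD Distance i 0 then (PySem.List.pyGetD Distance i 0, i) else s)
      ((0 : Int), (0 : Int)))).2

-- ===== PORT B =====
-- pass 1: max fold seeded with 0; pass 2: last index whose value reaches the max
def F_D_alt (Distance : List Int) : Int :=
  let M := Distance.foldl (fun M d => if M < d then d else M) 0
  let idx := (PySem.List.enumerate Distance).foldl
      (fun (idx : Int) (p : Int × Int) => if M ≤ p.2 then p.1 else idx) 0
  idx

-- ===== PRECONDITION & SPEC =====
def Spec_F_D (Distance : List Int) (out : Int) : Prop := out = F_D_alt Distance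
instance (Distance : List Int) (out : Int) : Decidable (Spec_F_D Distance out) := by unfold Spec_F_D; infer_instance

-- ===== CLAIM (what is proved, stated in full; the proofs are below) =====
def Claim_equal_F_D : Prop := ∀ (Distance : List Int), Dom_F_D Distance → Spec_F_D Distance (F_D Distance)

-- ===== LEMMAS AND PROOFS =====

-- enumerate of a snoc
theorem enumerate_append_singleton (xs : List Int) (x : Int) (s : Int) :
    PySem.List.enumerate (xs ++ [x]) s = PySem.List.enumerate xs s ++ [(s + xs.length, x)] := by
  induction xs generalizing s with
  | nil => simp [PySem.List.enumerate_cons]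
  | cons y ys ih =>
      simp only [List.cons_append, PySem.List.enumerate_cons, ih, List.length_cons]
      push_cast; ring_nf

-- the maximum fold is List.foldl max
theorem mfold_eq_max (xs : List Int) (a : Int) :
    xs.foldl (fun M d => if M < d then d else M) a = xs.foldl max a := by
  apply PySem.List.foldl_congr_mem
  intro acc x _
  simp [max_def]; omega

-- the main invariant: A's pair fold equals (B's max, B's last index)
theorem main_inv (xs : List Int) :
    (PySem.List.pyRange 0 (xs.length : Int) 1).foldl
      (fun (s : Int × Int) (i : Int) =>
        if s.1 ≤ PySem.List.pyGetD xs i 0 then (PySem.List.pyGetD xs i 0, i) else s)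
      ((0 : Int), (0 : Int))
    = (xs.foldl max 0,
       (PySem.List.enumerate xs).foldl
         (fun (idx : Int) (p : Int × Int) => if xs.foldl max 0 ≤ p.2 then p.1 else idx) 0) := by
  induction xs using List.reverseRecOn with
  | nil => simp [PySem.List.pyRange]
  | append_singleton ys x ih =>
      have hlen : ((ys ++ [x]).length : Int) = (ys.length : Int) + 1 := by simp
      rw [hlen, PySem.List.pyRange_one_succ_right (by positivity), List.foldl_append]
      have hcongr :
          (PySem.List.pyRange 0 (ys.length : Int) 1).foldl
            (fun (s : Int × Int) (i : Int) =>
              if s.1 ≤ PySem.List.pyGetD (ys ++ [x]) i 0 then (PySem.List.pyGetD (ys ++ [x]) i 0, i) else s)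
            ((0 : Int), (0 : Int))
          = (PySem.List.pyRange 0 (ys.length : Int) 1).foldl
            (fun (s : Int × Int) (i : Int) =>
              if s.1 ≤ PySem.List.pyGetD ys i 0 then (PySem.List.pyGetD ys i 0, i) else s)
            ((0 : Int), (0 : Int)) := by
        apply PySem.List.foldl_congr_mem
        intro acc i hi
        have h2 := PySem.List.mem_pyRange_one.mp hi
        have hget : PySem.List.pyGetD (ys ++ [x]) i 0 = PySem.List.pyGetD ys i 0 := by
          rw [PySem.List.pyGetD_eq_getElem _ 0 h2.1 (by simp; omega),
              PySem.List.pyGetD_eq_getElem _ 0 h2.1 (by omega)]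
          exact List.getElem_append_left (by omega)
        rw [hget]
      rw [hcongr, ih]
      simp only [List.foldl_cons, List.foldl_nil]
      have hgetx : PySem.List.pyGetD (ys ++ [x]) (ys.length : Int) 0 = x := by
        rw [PySem.List.pyGetD_natCast]
        simp [List.getD]
      rw [hgetx, enumerate_append_singleton]
      simp only [List.foldl_append, List.foldl_cons, List.foldl_nil, zero_add]
      by_cases hc : ys.foldl max 0 ≤ x
      · rw [if_pos hc, max_eq_right hc, if_pos le_rfl]
      · rw [if_neg hc, max_eq_left (le_of_not_ge hc), if_neg hc]

-- ===== VERDICT (by name: the statement is the Claim_ definition above) =====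
theorem F_D_spec : Claim_equal_F_D := by
  intro xs _
  unfold Spec_F_D F_D F_D_alt
  rw [main_inv, mfold_eq_max]
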